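-- pv_equiv track=rewrite | github.com/Project-Navi/navi-fractal | docs/reference/fractal_analysis_v4_mfa.py | masses_from_layers
-- ===== SOURCE A (Python) =====
-- from typing import (
--     Dict,
--     Iterable,
--     List,
--     Optional,
--     Sequence,
--     Set,
--     Tuple,
--     Union,
--     Literal,
-- )
--
-- def masses_from_layers(layer_counts: List[int], radii: Sequence[int]) -> List[int]:
--     radii_sorted = sorted(set(int(r) for r in radii))
--     if not radii_sorted or radii_sorted[0] < 1:
--         raise ValueError("radii must be >=1 and non-empty")
--     r_max = len(layer_counts) - 1
--     if radii_sorted[-1] > r_max: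
--         raise ValueError("radii exceed r_max")
--
--     out: List[int] = []
--     cumulative = 0
--     d = 0
--     for r in radii_sorted:
--         while d <= r:
--             cumulative += layer_counts[d]
--             d += 1
--         out.append(cumulative)
--     return out
-- ===== SOURCE B (Python) =====
-- def masses_from_layers(layer_counts, radii):
--     radii_sorted = sorted(set(int(r) for r in radii))
--     if not radii_sorted or radii_sorted[0] < 1:
--         raise ValueError("radii must be >=1 and non-empty")
--     if radii_sorted[-1] > len(layer_counts) - 1:
--         raise ValueError("radii exceed r_max")
--     prefix = []
--     total = 0
--     for c in layer_counts:
--         total += c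
--         prefix.append(total)
--     return [prefix[r] for r in radii_sorted]
-- ===== Notes on version B (the rewrite author's own statement) =====
-- stated objective: alternative
-- what changed: B precomputes a full prefix-sum table of layer_counts once and answers each sorted radius by an independent table lookup, instead of A's single persistent advancing pointer that merges the sweep over layer_counts with the accumulation across radii.
import Mathlib
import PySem

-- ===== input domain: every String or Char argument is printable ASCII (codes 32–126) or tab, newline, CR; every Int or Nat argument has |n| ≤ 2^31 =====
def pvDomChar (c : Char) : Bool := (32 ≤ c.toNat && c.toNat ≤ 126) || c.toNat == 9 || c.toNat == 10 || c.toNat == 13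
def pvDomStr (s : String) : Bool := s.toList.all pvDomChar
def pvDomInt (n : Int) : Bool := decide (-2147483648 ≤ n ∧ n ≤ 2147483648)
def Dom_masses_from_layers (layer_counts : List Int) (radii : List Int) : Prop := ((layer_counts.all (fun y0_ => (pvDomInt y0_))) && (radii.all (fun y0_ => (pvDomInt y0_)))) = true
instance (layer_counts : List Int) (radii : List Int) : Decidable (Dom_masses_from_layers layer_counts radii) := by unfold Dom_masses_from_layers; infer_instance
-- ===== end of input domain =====

-- B replaces A's persistent advancing pointer (merged sweep + accumulation) by a
-- precomputed prefix-sum table and one independent lookup per sorted radius (objective: alternative).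

-- ===== PORT A =====
-- inner 'while d <= r: cumulative += layer_counts[d]; d += 1' (pyGetD's default is
-- unreachable under Pre_, which keeps every radius within range)
def whileA (lc : List Int) (r : Int) (cum : Int) (d : Int) : Int × Int :=
  if d ≤ r then whileA lc r (cum + PySem.List.pyGetD lc d 0) (d + 1) else (cum, d)
termination_by (r + 1 - d).toNat
decreasing_by omega

def masses_from_layers (layer_counts : List Int) (radii : List Int) : List Int :=
  let radii_sorted := PySem.List.sorted (PySem.Set.ofList radii) (fun x => x) false
  -- the two 'raise ValueError' checks fire exactly outside Pre_ (excluded there)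
  (radii_sorted.foldl
    (fun (st : List Int × Int × Int) r =>
      let p := whileA layer_counts r st.2.1 st.2.2
      (st.1 ++ [p.1], p.1, p.2))
    ([], 0, 0)).1

-- ===== PORT B =====
def masses_from_layers_alt (layer_counts : List Int) (radii : List Int) : List Int :=
  let radii_sorted := PySem.List.sorted (PySem.Set.ofList radii) (fun x => x) false
  -- same validation point: the raises fire exactly outside Pre_
  let pfx := (layer_counts.foldl
      (fun (st : List Int × Int) c => (st.1 ++ [st.2 + c], st.2 + c)) ([], 0)).1
  radii_sorted.map (fun r => PySem.List.pyGetD pfx r 0)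

-- ===== PRECONDITION & SPEC =====
-- Pre_ = exactly the inputs where A returns (no ValueError, and every layer_counts[d] access in range)
def Pre_masses_from_layers (layer_counts : List Int) (radii : List Int) : Prop :=
  radii ≠ [] ∧ ∀ r ∈ radii, 1 ≤ r ∧ r ≤ (layer_counts.length : Int) - 1
instance (layer_counts : List Int) (radii : List Int) : Decidable (Pre_masses_from_layers layer_counts radii) := by unfold Pre_masses_from_layers; infer_instance
def pvWitness_masses_from_layers : List Int × List Int := ([2, 3, 5], [1, 2])

def Spec_masses_from_layers (layer_counts : List Int) (radii : List Int) (out : List Int) : Prop := out = masses_from_layers_alt layer_counts radii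
instance (layer_counts : List Int) (radii : List Int) (out : List Int) : Decidable (Spec_masses_from_layers layer_counts radii out) := by unfold Spec_masses_from_layers; infer_instance

-- ===== CLAIM (what is proved, stated in full; the proofs are below) =====
def Claim_equal_masses_from_layers : Prop := ∀ (layer_counts : List Int) (radii : List Int), Dom_masses_from_layers layer_counts radii → Pre_masses_from_layers layer_counts radii → Spec_masses_from_layers layer_counts radii (masses_from_layers layer_counts radii)

-- ===== LEMMAS AND PROOFS =====

-- the inner while loop finishes the running prefix sum through index r
theorem whileA_spec (lc : List Int) : ∀ (n : Nat) (r cum d : Int), 0 ≤ d → 0 ≤ r →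
    d ≤ r + 1 → r ≤ (lc.length : Int) - 1 → (r + 1 - d).toNat = n →
    cum = (lc.take d.toNat).sum →
    whileA lc r cum d = ((lc.take (r.toNat + 1)).sum, r + 1) := by
  intro n
  induction n with
  | zero =>
    intro r cum d hd hr hdr hlen hn hcum
    have hde : d = r + 1 := by omega
    rw [whileA]
    simp only [if_neg (by omega : ¬ d ≤ r)]
    subst hcum
    rw [hde, show (r + 1).toNat = r.toNat + 1 by omega]
  | succ k ih =>
    intro r cum d hd hr hdr hlen hn hcum
    have hdle : d ≤ r := by omega
    rw [whileA]
    simp only [if_pos hdle]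
    have hdlt : d < (lc.length : Int) := by omega
    have hget : PySem.List.pyGetD lc d 0 = lc[d.toNat] :=
      PySem.List.pyGetD_eq_getElem lc 0 hd hdlt
    have hcum' : cum + PySem.List.pyGetD lc d 0 = (lc.take (d + 1).toNat).sum := by
      rw [hget, hcum]
      have hlt : d.toNat < lc.length := by omega
      have : (d + 1).toNat = d.toNat + 1 := by omega
      rw [this, List.sum_take_succ lc d.toNat hlt]
    exact ih r _ (d + 1) (by omega) hr (by omega) hlen (by omega) hcum'

-- B's table-building fold, characterized by a recursive prefix-sum list
def prefixList : List Int → Int → List Int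
  | [], _ => []
  | c :: cs, t => (t + c) :: prefixList cs (t + c)

theorem foldB_eq : ∀ (lc acc : List Int) (t : Int),
    (lc.foldl (fun (st : List Int × Int) c => (st.1 ++ [st.2 + c], st.2 + c)) (acc, t)).1
      = acc ++ prefixList lc t := by
  intro lc
  induction lc with
  | nil => intro acc t; simp [prefixList]
  | cons c cs ih =>
    intro acc t
    simp only [List.foldl_cons, prefixList]
    rw [ih (acc ++ [t + c]) (t + c)]
    simp

theorem length_prefixList : ∀ (lc : List Int) (t : Int), (prefixList lc t).length = lc.length := by
  intro lc
  induction lc with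
  | nil => intro t; simp [prefixList]
  | cons c cs ih => intro t; simp [prefixList, ih]

theorem prefixList_get : ∀ (lc : List Int) (t : Int) (k : Nat), k < lc.length →
    (prefixList lc t)[k]? = some (t + (lc.take (k + 1)).sum) := by
  intro lc
  induction lc with
  | nil => intro t k h; simp at h
  | cons c cs ih =>
    intro t k h
    cases k with
    | zero => simp [prefixList]
    | succ k =>
      simp only [prefixList, List.getElem?_cons_succ]
      rw [ih (t + c) k (by simpa using h)]
      simp only [List.take_succ_cons, List.sum_cons]
      congr 1
      ring

-- A's outer fold produces the inclusive prefix sum at each sorted radius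
theorem foldA_spec (lc : List Int) : ∀ (rs acc : List Int) (cum d : Int), 0 ≤ d →
    rs.Pairwise (· < ·) →
    (∀ r ∈ rs, d ≤ r ∧ 1 ≤ r ∧ r ≤ (lc.length : Int) - 1) →
    cum = (lc.take d.toNat).sum →
    (rs.foldl
      (fun (st : List Int × Int × Int) r =>
        let p := whileA lc r st.2.1 st.2.2
        (st.1 ++ [p.1], p.1, p.2))
      (acc, cum, d)).1
    = acc ++ rs.map (fun r => (lc.take (r.toNat + 1)).sum) := by
  intro rs
  induction rs with
  | nil => intro acc cum d _ _ _ _; simp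
  | cons r rs' ih =>
    intro acc cum d hd hpw hmem hcum
    have hr := hmem r (List.mem_cons_self)
    have hw : whileA lc r cum d = ((lc.take (r.toNat + 1)).sum, r + 1) :=
      whileA_spec lc (r + 1 - d).toNat r cum d hd (by omega) (by omega) hr.2.2 rfl hcum
    simp only [List.foldl_cons, hw]
    rw [ih (acc ++ [(lc.take (r.toNat + 1)).sum]) _ (r + 1) (by omega)
        (List.Pairwise.of_cons hpw)
        (by
          intro r' hr'
          have h1 := hmem r' (List.mem_cons_of_mem _ hr')
          have h2 : r < r' := (List.pairwise_cons.mp hpw).1 r' hr'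
          exact ⟨by omega, h1.2.1, h1.2.2⟩)
        (by rw [show (r + 1).toNat = r.toNat + 1 by omega])]
    simp

-- ===== VERDICT (by name: the statement is the Claim_ definition above) =====
theorem masses_from_layers_spec : Claim_equal_masses_from_layers := by
  intro lc radii _ hpre
  unfold Spec_masses_from_layers masses_from_layers masses_from_layers_alt
  simp only []
  have hpw : (PySem.List.sorted (PySem.Set.ofList radii) (fun x => x) false).Pairwise (· < ·) :=
    PySem.List.sorted_ofList_pairwise_lt radii
  have hmem : ∀ r ∈ PySem.List.sorted (PySem.Set.ofList radii) (fun x => x) false,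
      1 ≤ r ∧ r ≤ (lc.length : Int) - 1 := by
    intro r hr
    have : r ∈ radii := by
      have := (PySem.List.mem_sorted _ _ _ _).mp hr
      simpa [PySem.Set.mem_ofList] using this
    exact hpre.2 r this
  rw [foldA_spec lc _ [] 0 0 (by omega) hpw
      (fun r hr => ⟨(hmem r hr).1.trans' (by omega), (hmem r hr).1, (hmem r hr).2⟩) (by simp)]
  rw [foldB_eq]
  simp only [List.nil_append]
  apply List.map_congr_left
  intro r hr
  have h := hmem r hr
  have hlen : (prefixList lc 0).length = lc.length := length_prefixList lc 0
  have hget : PySem.List.pyGetD (prefixList lc 0) r 0 = (prefixList lc 0)[r.toNat] :=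
    PySem.List.pyGetD_eq_getElem _ 0 (by omega) (by rw [hlen]; omega)
  rw [hget]
  have hk : r.toNat < lc.length := by omega
  have := prefixList_get lc 0 r.toNat hk
  rw [List.getElem?_eq_getElem (by omega)] at this
  have h2 : (prefixList lc 0)[r.toNat] = 0 + (lc.take (r.toNat + 1)).sum := Option.some.inj this
  rw [h2]; ring
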